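-- pv_equiv track=rewrite | github.com/tomashauser/bsy-steganography | controller/controller.py | decode_shopping_list_to_usernames
-- ===== SOURCE A (Python) =====
-- def decode_shopping_list_to_usernames(shopping_list, item_to_char_map, delimiter='-----'):
--     shopping_list = [item.strip() for item in shopping_list.split(',')]
--     usernames = []
--     current_username = []
--     for item in shopping_list:
--         if item == delimiter:
--             usernames.append(''.join(current_username))
--             current_username = []
--         else:
--             for char, mapped_item in item_to_char_map.items():
--                 if char == item:
--                     current_username.append(mapped_item)
--                     break
--     return usernames
-- ===== SOURCE B (Python) =====
-- def decode_shopping_list_to_usernames(shopping_list, item_to_char_map, delimiter='-----'):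
--     items = [part.strip() for part in shopping_list.split(',')]
--     usernames = []
--     while delimiter in items:
--         k = items.index(delimiter)
--         usernames.append(''.join(item_to_char_map[it] for it in items[:k] if it in item_to_char_map))
--         items = items[k + 1:]
--     return usernames
-- ===== Notes on version B (the rewrite author's own statement) =====
-- stated objective: alternative
-- what changed: Instead of scanning item by item with a current-username accumulator and an inner linear scan of the map per item, B repeatedly locates the next delimiter, maps the whole preceding segment through the dict in one comprehension, and continues on the remainder; the tail after the last delimiter is discarded structurally (the while loop never reaches it).
import Mathlib
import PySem

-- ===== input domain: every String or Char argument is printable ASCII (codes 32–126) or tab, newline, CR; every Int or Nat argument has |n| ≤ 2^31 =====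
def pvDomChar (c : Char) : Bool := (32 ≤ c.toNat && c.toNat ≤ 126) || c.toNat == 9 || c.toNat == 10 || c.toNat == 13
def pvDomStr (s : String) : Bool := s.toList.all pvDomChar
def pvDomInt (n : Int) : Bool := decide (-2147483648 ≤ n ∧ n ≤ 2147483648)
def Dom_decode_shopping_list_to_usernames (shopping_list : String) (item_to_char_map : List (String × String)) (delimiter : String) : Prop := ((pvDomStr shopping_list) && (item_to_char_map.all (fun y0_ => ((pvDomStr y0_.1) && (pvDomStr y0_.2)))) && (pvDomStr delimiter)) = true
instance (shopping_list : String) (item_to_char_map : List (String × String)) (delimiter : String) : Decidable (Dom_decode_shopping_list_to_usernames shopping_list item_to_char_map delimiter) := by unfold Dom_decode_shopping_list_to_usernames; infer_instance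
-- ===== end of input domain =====

-- B replaces A's item-by-item state machine (current-username accumulator + inner scan of the
-- map per item) by a segment-at-a-time loop: find the next delimiter, map the whole preceding
-- segment through the dict, recurse on the remainder. Objective: alternative decomposition.

-- ===== PORT A =====
-- inner 'for char, mapped_item in item_to_char_map.items(): if char == item: append; break'
def pvInnerA (m : List (String × String)) (item : String) (cur : List String) : List String :=
  match m with
  | [] => cur
  | (c, v) :: rest => if c == item then cur ++ [v] else pvInnerA rest item cur

def pvStepA (m : List (String × String)) (delim : String) (st : List String × List String) (item : String) : List String × List String :=
  if item == delim then (st.1 ++ [PySem.Str.join "" st.2], [])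
  else (st.1, pvInnerA m item st.2)

def decode_shopping_list_to_usernames (shopping_list : String) (item_to_char_map : List (String × String)) (delimiter : String) : List String :=
  let items := ((PySem.Str.split? shopping_list ",").getD []).map (fun it => PySem.Str.strip it)
  (items.foldl (pvStepA item_to_char_map delimiter) ([], [])).1

-- ===== PORT B =====
-- ''.join(item_to_char_map[it] for it in seg if it in item_to_char_map)
def pvSegB (m : List (String × String)) (seg : List String) : String :=
  PySem.Str.join "" (seg.filterMap (fun it => (PySem.Dict.mk m).get? it))

-- the while loop: 'while delimiter in items: k = items.index(delimiter); append; items = items[k+1:]'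
def pvBuildB (m : List (String × String)) (delim : String) (acc : List String) (items : List String) : List String :=
  match h : PySem.List.index? items delim with
  | none => acc
  | some k => pvBuildB m delim (acc ++ [pvSegB m (items.take k)]) (items.drop (k + 1))
termination_by items.length
decreasing_by
  obtain ⟨hk, -, -⟩ := PySem.List.getElem_of_index?_eq_some h
  simp only [List.length_drop]; omega

def decode_shopping_list_to_usernames_alt (shopping_list : String) (item_to_char_map : List (String × String)) (delimiter : String) : List String :=
  let items := ((PySem.Str.split? shopping_list ",").getD []).map (fun it => PySem.Str.strip it)
  pvBuildB item_to_char_map delimiter [] items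

-- ===== PRECONDITION & SPEC =====
def Spec_decode_shopping_list_to_usernames (shopping_list : String) (item_to_char_map : List (String × String)) (delimiter : String) (out : List String) : Prop := out = decode_shopping_list_to_usernames_alt shopping_list item_to_char_map delimiter
instance (shopping_list : String) (item_to_char_map : List (String × String)) (delimiter : String) (out : List String) : Decidable (Spec_decode_shopping_list_to_usernames shopping_list item_to_char_map delimiter out) := by unfold Spec_decode_shopping_list_to_usernames; infer_instance

-- ===== CLAIM (what is proved, stated in full; the proofs are below) =====
def Claim_equal_decode_shopping_list_to_usernames : Prop := ∀ (shopping_list : String) (item_to_char_map : List (String × String)) (delimiter : String), Dom_decode_shopping_list_to_usernames shopping_list item_to_char_map delimiter → Spec_decode_shopping_list_to_usernames shopping_list item_to_char_map delimiter (decode_shopping_list_to_usernames shopping_list item_to_char_map delimiter)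

-- ===== LEMMAS AND PROOFS =====

-- A's inner scan is exactly a first-match dict lookup appended to the accumulator
theorem pvInnerA_eq (m : List (String × String)) (item : String) (cur : List String) :
    pvInnerA m item cur = cur ++ ((PySem.Dict.mk m).get? item).toList := by
  induction m with
  | nil => simp [pvInnerA, PySem.Dict.get?]
  | cons p rest ih =>
    obtain ⟨c, v⟩ := p
    by_cases hc : (c == item) = true
    · simp [pvInnerA, hc, PySem.Dict.get?_mk_cons]
    · simp only [pvInnerA, hc, Bool.false_eq_true, if_false,
        PySem.Dict.get?_mk_cons, ih]

-- folding A's step over a delimiter-free segment just accumulates the mapped items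
theorem foldA_no_delim (m : List (String × String)) (delim : String)
    (seg : List String) (hnd : delim ∉ seg) (us cur : List String) :
    seg.foldl (pvStepA m delim) (us, cur)
      = (us, cur ++ seg.filterMap (fun it => (PySem.Dict.mk m).get? it)) := by
  induction seg generalizing cur with
  | nil => simp
  | cons x rest ih =>
    have hx : x ≠ delim := fun h => hnd (h ▸ List.mem_cons_self)
    have hrest : delim ∉ rest := fun h => hnd (List.mem_cons_of_mem _ h)
    have hxb : (x == delim) = false := by simp [hx]
    simp only [List.foldl_cons, pvStepA, hxb, Bool.false_eq_true, if_false,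
      ih hrest, pvInnerA_eq, List.filterMap_cons]
    cases hget : (PySem.Dict.mk m).get? x <;> simp

-- unfolding pvBuildB when a delimiter is present
theorem pvBuildB_eq_some {m : List (String × String)} {delim : String} {acc items : List String}
    {k : Nat} (h : PySem.List.index? items delim = some k) :
    pvBuildB m delim acc items
      = pvBuildB m delim (acc ++ [pvSegB m (items.take k)]) (items.drop (k + 1)) := by
  rw [pvBuildB]
  split
  · rename_i heq; rw [h] at heq; cases heq
  · rename_i k' heq; rw [h] at heq; cases heq; rfl

-- the main invariant: A's fold computes B's segment recursion
theorem foldA_eq_buildB (m : List (String × String)) (delim : String)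
    (items : List String) (us : List String) :
    (items.foldl (pvStepA m delim) (us, [])).1 = pvBuildB m delim us items := by
  induction hlen : items.length using Nat.strong_induction_on generalizing items us with
  | _ n ih =>
  cases hidx : PySem.List.index? items delim with
  | none =>
    have hnd : delim ∉ items := (PySem.List.index?_eq_none_iff items delim).mp hidx
    rw [pvBuildB, hidx, foldA_no_delim m delim items hnd]
  | some k =>
    obtain ⟨pre, suf, hsplit, hklen, hpre⟩ := (PySem.List.index?_eq_some_iff items delim k).mp hidx
    subst hsplit
    have htake : (pre ++ delim :: suf).take k = pre := by
      rw [← hklen, List.take_left]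
    have hdrop : (pre ++ delim :: suf).drop (k + 1) = suf := by
      rw [← hklen]
      simp [List.drop_append]
    rw [pvBuildB_eq_some hidx, htake, hdrop]
    rw [List.foldl_append, foldA_no_delim m delim pre hpre]
    have hstep : pvStepA m delim
        (us, [] ++ pre.filterMap (fun it => (PySem.Dict.mk m).get? it)) delim
        = (us ++ [pvSegB m pre], []) := by
      simp [pvStepA, pvSegB]
    rw [List.foldl_cons, hstep]
    have hlt : suf.length < n := by
      subst hlen; simp; omega
    exact ih suf.length hlt suf (us ++ [pvSegB m pre]) rfl

-- ===== VERDICT (by name: the statement is the Claim_ definition above) =====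
theorem decode_shopping_list_to_usernames_spec : Claim_equal_decode_shopping_list_to_usernames := by
  intro shopping_list item_to_char_map delimiter _
  unfold Spec_decode_shopping_list_to_usernames
  unfold decode_shopping_list_to_usernames decode_shopping_list_to_usernames_alt
  exact foldA_eq_buildB _ _ _ []
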